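-- pv_equiv track=rewrite | github.com/macshonle/openword-lexicon | tools/extract_wikitext.py | word_to_filename
-- ===== SOURCE A (Python) =====
-- def word_to_filename(word: str) -> str:
--     """Encode a word to a filesystem-safe filename (without extension).
--
--     Uses punycode for Unicode characters and octal for case pattern.
--     This ensures unique filenames on case-insensitive filesystems.
--
--     Case pattern encoding:
--         - Build binary string left-to-right: 1=upper, 0=lower
--         - Pad on RIGHT to multiple of 3 bits, convert to octal
--         - Strip trailing zeros (word length is known from decoding)
--         - Use underscore delimiter (never appears in punycode)
--
--     Examples:
--         sat         -> sat
--         Sat         -> sat_4       (binary: 100 = octal 4)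
--         SAT         -> sat_7       (binary: 111 = octal 7)
--         March       -> march_4     (binary: 10000, only leading digit needed)
--         MARCH       -> march_76    (binary: 11111 -> 111 110 = octal 76)
--         Afghanistan -> afghanistan_4  (first letter uppercase = 4)
--         tiếng       -> xn--ting-hv5a
--         Tiếng       -> xn--ting-hv5a_4
--     """
--     # Build binary string left-to-right (1=upper, 0=lower)
--     case_binary = "".join("1" if c.isupper() else "0" for c in word)
--     has_upper = "1" in case_binary
--
--     # Convert to lowercase and encode as punycode
--     lower_word = word.lower()
--     try:
--         # Punycode encode (handles Unicode)
--         encoded = lower_word.encode("idna").decode("ascii")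
--     except (UnicodeError, UnicodeDecodeError):
--         # Fallback for edge cases that IDNA can't handle
--         encoded = lower_word.encode("punycode").decode("ascii")
--         if encoded != lower_word:
--             encoded = "xn--" + encoded
--
--     # Add case suffix if needed (underscore delimiter, strip trailing zeros)
--     if has_upper:
--         # Pad on RIGHT to multiple of 3 for clean octal conversion
--         while len(case_binary) % 3 != 0:
--             case_binary += "0"
--         case_octal = oct(int(case_binary, 2))[2:].rstrip("0") or "0"
--         return f"{encoded}_{case_octal}"
--     return encoded
-- ===== SOURCE B (Python) =====
-- def word_to_filename(word: str) -> str: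
--     """Encode a word to a filesystem-safe filename (without extension).
--
--     Same lowercasing and idna-with-punycode-fallback as before; the case
--     pattern is emitted directly as octal digits, one per group of three
--     characters (4/2/1 for an uppercase first/second/third character, with
--     positions past the end counting as 0), stripping the zero digits from
--     both ends of the digit string.
--     """
--     has_upper = any(c.isupper() for c in word)
--
--     lower_word = word.lower()
--     try:
--         encoded = lower_word.encode("idna").decode("ascii")
--     except (UnicodeError, UnicodeDecodeError):
--         encoded = lower_word.encode("punycode").decode("ascii")
--         if encoded != lower_word:
--             encoded = "xn--" + encoded
--
--     if not has_upper:
--         return encoded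
--
--     def _u(s: str) -> int:
--         return 1 if s.isupper() else 0
--
--     digits = "".join(
--         "01234567"[4 * _u(word[i:i + 1]) + 2 * _u(word[i + 1:i + 2]) + _u(word[i + 2:i + 3])]
--         for i in range(0, len(word), 3)
--     )
--     case_octal = digits.strip("0") or "0"
--     return f"{encoded}_{case_octal}"
-- ===== Notes on version B (the rewrite author's own statement) =====
-- stated objective: simpler
-- what changed: The case pattern is emitted digit-by-digit from consecutive groups of three characters (4/2/1 per uppercase position, zero digits stripped from both ends) instead of building a binary string, right-padding it to a multiple of 3, converting through int(...,2) and oct(), and rstripping zeros.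
import Mathlib
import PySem

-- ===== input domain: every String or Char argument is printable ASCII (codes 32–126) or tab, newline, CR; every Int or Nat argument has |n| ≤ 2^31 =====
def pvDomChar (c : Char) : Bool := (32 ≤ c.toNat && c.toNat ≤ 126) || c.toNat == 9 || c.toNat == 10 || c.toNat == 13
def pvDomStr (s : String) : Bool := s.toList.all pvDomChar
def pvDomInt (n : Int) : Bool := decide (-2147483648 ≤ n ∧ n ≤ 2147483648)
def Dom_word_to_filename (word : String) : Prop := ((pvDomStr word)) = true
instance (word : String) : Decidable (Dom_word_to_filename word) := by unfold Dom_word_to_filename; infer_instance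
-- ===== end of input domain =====

-- B changes only the case-pattern encoding: octal digits computed directly per
-- 3-character group and stripped of zero digits on both ends, instead of A's
-- binary string + right-pad + int(...,2) + oct() + rstrip; objective: simpler.

-- ===== PORT A =====

-- CPython 'idna' codec on an all-ASCII input takes its fast path: it returns the
-- string unchanged iff every '.'-separated label except the last has length 1..63
-- and the last has length ≤ 63, and raises UnicodeError otherwise. Hand-ported
-- (no PySem primitive); exact on the ASCII domain. `n` is the current label length.
def pvIdnaLabelsOk : List Char → Nat → Bool
  | [], n => n ≤ 63
  | c :: t, n => if c = '.' then (decide (0 < n) && decide (n ≤ 63)) && pvIdnaLabelsOk t 0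
                 else pvIdnaLabelsOk t (n + 1)

-- lower_word.encode("idna").decode("ascii") with the punycode fallback of both
-- Pythons. Punycode of an all-ASCII string is the string followed by '-' (all code
-- points are basic); hand-ported, exact on the ASCII domain.
def pvEncodeIdnaOrPuny (lw : List Char) : List Char :=
  if pvIdnaLabelsOk lw 0 then lw
  else
    let p := lw ++ ['-']
    if p ≠ lw then 'x' :: 'n' :: '-' :: '-' :: p else p

-- oct(n)[2:]: octal digits of n, most significant first (hand-ported; exact for n ≥ 0)
def pvOctChars (n : Nat) : List Char :=
  if _h : n < 8 then [Nat.digitChar n]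
  else pvOctChars (n / 8) ++ [Nat.digitChar (n % 8)]
  decreasing_by exact Nat.div_lt_self (by omega) (by omega)

-- s.rstrip("0") on a list of characters
def pvRstripZeros (l : List Char) : List Char :=
  ((l.reverse).dropWhile (· = '0')).reverse

def word_to_filename (word : String) : String :=
  let cs := word.toList
  -- case_binary = "".join("1" if c.isupper() else "0" for c in word)
  let case_binary := cs.map (fun c => if PySem.Chars.isupper c then '1' else '0')
  -- has_upper = "1" in case_binary
  let has_upper := case_binary.contains '1'
  let lower_word := PySem.Chars.lower cs
  let encoded := pvEncodeIdnaOrPuny lower_word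
  if has_upper then
    -- while len(case_binary) % 3 != 0: case_binary += "0"  (appends exactly (3 - len % 3) % 3 zeros)
    let padded := case_binary ++ List.replicate ((3 - case_binary.length % 3) % 3) '0'
    -- int(case_binary, 2): chars are all '0'/'1', so a binary fold is exact
    let n := padded.foldl (fun a c => 2 * a + (if c = '1' then 1 else 0)) 0
    -- oct(...)[2:].rstrip("0") or "0"
    let case_octal := pvRstripZeros (pvOctChars n)
    let case_octal := if case_octal = [] then ['0'] else case_octal
    String.ofList (encoded ++ '_' :: case_octal)
  else String.ofList encoded

-- ===== PORT B =====

-- 1 if s.isupper() else 0, for a single character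
def pvUb (c : Char) : Nat := if PySem.Chars.isupper c then 1 else 0

-- one octal digit per group of three characters (missing positions count 0)
def pvChunkOct : List Char → List Char
  | [] => []
  | [a] => [Nat.digitChar (4 * pvUb a)]
  | [a, b] => [Nat.digitChar (4 * pvUb a + 2 * pvUb b)]
  | a :: b :: c :: t => Nat.digitChar (4 * pvUb a + 2 * pvUb b + pvUb c) :: pvChunkOct t

-- digits.strip("0"): strip '0' from both ends
def pvStripZeros (l : List Char) : List Char :=
  pvRstripZeros (l.dropWhile (· = '0'))

def word_to_filename_alt (word : String) : String :=
  let cs := word.toList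
  let has_upper := cs.any PySem.Chars.isupper
  let lower_word := PySem.Chars.lower cs
  let encoded := pvEncodeIdnaOrPuny lower_word
  if has_upper then
    let case_octal := pvStripZeros (pvChunkOct cs)
    let case_octal := if case_octal = [] then ['0'] else case_octal
    String.ofList (encoded ++ '_' :: case_octal)
  else String.ofList encoded

-- ===== PRECONDITION & SPEC =====
def Spec_word_to_filename (word : String) (out : String) : Prop := out = word_to_filename_alt word
instance (word : String) (out : String) : Decidable (Spec_word_to_filename word out) := by unfold Spec_word_to_filename; infer_instance

-- ===== CLAIM (what is proved, stated in full; the proofs are below) =====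
def Claim_equal_word_to_filename : Prop := ∀ (word : String), Dom_word_to_filename word → Spec_word_to_filename word (word_to_filename word)

-- ===== LEMMAS AND PROOFS =====

-- the Nat values of B's chunk digits
def pvChunkDigits : List Char → List Nat
  | [] => []
  | [a] => [4 * pvUb a]
  | [a, b] => [4 * pvUb a + 2 * pvUb b]
  | a :: b :: c :: t => (4 * pvUb a + 2 * pvUb b + pvUb c) :: pvChunkDigits t

lemma pvChunkOct_eq_map (cs : List Char) :
    pvChunkOct cs = (pvChunkDigits cs).map Nat.digitChar := by
  induction cs using pvChunkOct.induct <;> simp [pvChunkOct, pvChunkDigits, *]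

lemma pvChunkDigits_lt (cs : List Char) : ∀ d ∈ pvChunkDigits cs, d < 8 := by
  induction cs using pvChunkOct.induct <;>
    simp_all [pvChunkDigits, pvUb] <;> split_ifs <;> omega

lemma pvUb_bit (c : Char) :
    (if (if PySem.Chars.isupper c then '1' else '0') = '1' then 1 else 0) = pvUb c := by
  unfold pvUb; by_cases h : PySem.Chars.isupper c <;> simp [h]

lemma pvFold_pad_eq_fold_chunks (cs : List Char) : ∀ a : Nat,
    ((cs.map (fun c => if PySem.Chars.isupper c then '1' else '0'))
      ++ List.replicate ((3 - (cs.map (fun c => if PySem.Chars.isupper c then '1' else '0')).length % 3) % 3) '0').foldl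
        (fun a c => 2 * a + (if c = '1' then 1 else 0)) a
    = (pvChunkDigits cs).foldl (fun a d => 8 * a + d) a := by
  induction cs using pvChunkOct.induct with
  | case1 => intro a; simp [pvChunkDigits]
  | case2 x =>
    intro a
    by_cases hx : PySem.Chars.isupper x <;>
      simp [pvChunkDigits, pvUb, hx] <;> ring
  | case3 x y =>
    intro a
    by_cases hx : PySem.Chars.isupper x <;> by_cases hy : PySem.Chars.isupper y <;>
      simp [pvChunkDigits, pvUb, hx, hy] <;> ring
  | case4 x y z t ih =>
    intro a
    have hmod : (t.length + 3) % 3 = t.length % 3 := by omega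
    simp only [List.map_cons, List.length_cons, List.foldl_cons, pvChunkDigits, List.cons_append]
    have hmod' : ∀ m : Nat, (3 - (m + 1 + 1 + 1) % 3) % 3 = (3 - m % 3) % 3 := fun m => by omega
    rw [hmod']
    have := ih (8 * a + (4 * pvUb x + 2 * pvUb y + pvUb z))
    simp only [List.length_map] at this ⊢
    rw [← this]
    rw [pvUb_bit, pvUb_bit, pvUb_bit]
    ring_nf

lemma pvHasUpper_eq (cs : List Char) :
    (cs.map (fun c => if PySem.Chars.isupper c then '1' else '0')).contains '1'
      = cs.any PySem.Chars.isupper := by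
  induction cs with
  | nil => rfl
  | cons c t ih =>
    simp only [List.map_cons, List.contains_cons, List.any_cons, ih]
    by_cases h : PySem.Chars.isupper c <;> simp [h]

lemma pvAny_chunk_ne_zero (cs : List Char) (h : cs.any PySem.Chars.isupper = true) :
    (pvChunkDigits cs).any (fun d => decide (d ≠ 0)) = true := by
  induction cs using pvChunkOct.induct with
  | case1 => simp at h
  | case2 a => simp_all [pvChunkDigits, pvUb]
  | case3 a b => simp_all [pvChunkDigits, pvUb]
  | case4 a b c t ih =>
    simp only [List.any_cons, Bool.or_eq_true] at h
    simp only [pvChunkDigits, List.any_cons, Bool.or_eq_true, decide_eq_true_eq]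
    rcases h with h | h | h | h
    · left; simp [pvUb, h]
    · left; simp [pvUb, h]
    · left; simp [pvUb, h]
    · right; simpa using ih h

lemma pvDigitChar_ne_zero {d : Nat} (hd : d < 8) (h : d ≠ 0) : Nat.digitChar d ≠ '0' := by
  interval_cases d
  · exact absurd rfl h
  all_goals decide

lemma pvOctChars_fold (ds : List Nat) : ∀ acc : Nat, 0 < acc → (∀ d ∈ ds, d < 8) →
    pvOctChars (ds.foldl (fun a d => 8 * a + d) acc) = pvOctChars acc ++ ds.map Nat.digitChar := by
  induction ds with
  | nil => intro acc _ _; simp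
  | cons d t ih =>
    intro acc hacc hlt
    have hd : d < 8 := hlt d (by simp)
    simp only [List.foldl_cons, List.map_cons]
    rw [ih (8 * acc + d) (by omega) (fun x hx => hlt x (by simp [hx]))]
    have h8 : ¬ (8 * acc + d < 8) := by omega
    rw [show pvOctChars (8 * acc + d) = pvOctChars ((8 * acc + d) / 8) ++ [Nat.digitChar ((8 * acc + d) % 8)] by
          rw [pvOctChars]; simp [h8]]
    have hdiv : (8 * acc + d) / 8 = acc := by omega
    have hmod : (8 * acc + d) % 8 = d := by omega
    rw [hdiv, hmod]
    simp

lemma pvOctChars_val (ds : List Nat) (hlt : ∀ d ∈ ds, d < 8)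
    (hnz : ds.any (fun d => decide (d ≠ 0)) = true) :
    pvOctChars (ds.foldl (fun a d => 8 * a + d) 0)
      = (ds.map Nat.digitChar).dropWhile (· = '0') := by
  induction ds with
  | nil => simp at hnz
  | cons d t ih =>
    have hd : d < 8 := hlt d (by simp)
    by_cases h0 : d = 0
    · subst h0
      simp only [List.foldl_cons, Nat.mul_zero, Nat.zero_add, List.map_cons]
      have : t.any (fun d => decide (d ≠ 0)) = true := by simpa using hnz
      rw [ih (fun x hx => hlt x (by simp [hx])) this]
      simp [Nat.digitChar, List.dropWhile]
    · simp only [List.foldl_cons, Nat.mul_zero, Nat.zero_add, List.map_cons]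
      rw [pvOctChars_fold t d (by omega) (fun x hx => hlt x (by simp [hx]))]
      have hne := pvDigitChar_ne_zero hd h0
      rw [List.dropWhile_cons_of_neg (by simpa using hne)]
      rw [pvOctChars]
      simp [hd]

-- the case suffixes agree when the word has an uppercase character
lemma pvSuffix_eq (cs : List Char) (h : cs.any PySem.Chars.isupper = true) :
    pvRstripZeros (pvOctChars
      (((cs.map (fun c => if PySem.Chars.isupper c then '1' else '0'))
        ++ List.replicate ((3 - (cs.map (fun c => if PySem.Chars.isupper c then '1' else '0')).length % 3) % 3) '0').foldl
          (fun a c => 2 * a + (if c = '1' then 1 else 0)) 0))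
    = pvStripZeros (pvChunkOct cs) := by
  rw [pvFold_pad_eq_fold_chunks cs 0,
      pvOctChars_val (pvChunkDigits cs) (pvChunkDigits_lt cs) (pvAny_chunk_ne_zero cs h),
      pvStripZeros, pvChunkOct_eq_map]

-- ===== VERDICT (by name: the statement is the Claim_ definition above) =====
theorem word_to_filename_spec : Claim_equal_word_to_filename := by
  intro word _
  show word_to_filename word = word_to_filename_alt word
  simp only [word_to_filename, word_to_filename_alt, pvHasUpper_eq]
  by_cases h : word.toList.any PySem.Chars.isupper = true
  · simp only [h, if_true, pvSuffix_eq word.toList h]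
  · simp only [h, Bool.false_eq_true, if_false]
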